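-- pv_equiv track=rewrite | github.com/ellynhan/challenge100-codingtest-study | hall_of_fame/lysuk96/Week6/06_PGS_주식가격.py | solution
-- ===== SOURCE A (Python) =====
-- import collections
--
-- def solution(prices):
--     q = collections.deque(prices)
--     answer =[]
--     while len(q)>=2:
--         tmp = q.popleft()
--         time = 0
--         for price in prices:
--             time += 1
--             if tmp > price:
--                 break
--         answer.append(time)
--
--     answer.append(0)
--     return answer
-- ===== SOURCE B (Python) =====
-- def solution(prices):
--     n = len(prices)
--     # running prefix minima: premin[j] = min(prices[0..j]); non-increasing
--     premin = []
--     m = None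
--     for p in prices:
--         if m is None or p < m:
--             m = p
--         premin.append(m)
--     answer = []
--     for i in range(n - 1):
--         tmp = prices[i]
--         # binary search: first index j with premin[j] < tmp (== first j with prices[j] < tmp)
--         lo, hi = 0, n  # invariant: first such index is always in [lo, hi]
--         while lo < hi:
--             mid = (lo + hi) // 2
--             if premin[mid] < tmp:
--                 hi = mid
--             else:
--                 lo = mid + 1
--         answer.append(lo + 1 if lo < n else n)
--     answer.append(0)
--     return answer
-- ===== Notes on version B (the rewrite author's own statement) =====
-- stated objective: alternative
-- what changed: Replaces A's per-element linear rescan of the whole list from index 0 with a precomputed prefix-minimum array and a binary search for the first index whose prefix minimum is below each element (worst-case O(n log n) instead of O(n^2), though A's early break makes it fast on typical data).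
import Mathlib
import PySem

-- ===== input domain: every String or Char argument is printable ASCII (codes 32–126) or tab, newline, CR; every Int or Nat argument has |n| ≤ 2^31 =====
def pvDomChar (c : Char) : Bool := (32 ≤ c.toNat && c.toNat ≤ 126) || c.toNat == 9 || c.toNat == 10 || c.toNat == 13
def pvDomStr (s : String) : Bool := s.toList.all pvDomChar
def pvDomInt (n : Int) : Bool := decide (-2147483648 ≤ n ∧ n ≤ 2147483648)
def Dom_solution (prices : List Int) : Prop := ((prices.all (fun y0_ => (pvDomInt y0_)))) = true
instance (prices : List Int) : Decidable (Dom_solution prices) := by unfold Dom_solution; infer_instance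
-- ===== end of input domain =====

-- B replaces A's rescan-from-the-start inner loop by a prefix-minimum array plus a binary
-- search for the first index whose prefix minimum is below each element (same values everywhere).

-- ===== PORT A =====
-- inner 'for price in prices: time += 1; if tmp > price: break'
def solInner (tmp : Int) (rest : List Int) (time : Int) : Int :=
  match rest with
  | [] => time
  | p :: ps => if tmp > p then time + 1 else solInner tmp ps (time + 1)

-- 'while len(q) >= 2: tmp = q.popleft(); …; answer.append(time)'
def solLoop (prices : List Int) (q : List Int) (answer : List Int) : List Int :=
  match q with
  | t :: r :: rest => solLoop prices (r :: rest) (answer ++ [solInner t prices 0])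
  | _ => answer ++ [0]

def solution (prices : List Int) : List Int := solLoop prices prices []

-- ===== PORT B =====
-- 'm = None; for p in prices: if m is None or p < m: m = p; premin.append(m)'
def preminList (prices : List Int) : List Int :=
  (prices.foldl
    (fun (st : Option Int × List Int) p =>
      let m : Int := match st.1 with
        | none => p
        | some m0 => if p < m0 then p else m0
      (some m, st.2 ++ [m])) (none, [])).2

-- 'while lo < hi: mid = (lo+hi)//2; if premin[mid] < tmp: hi = mid else: lo = mid + 1'
-- (indices are always in range, so list indexing is ported as getD; the fuel argument hi - lo
-- only makes the loop structurally total — each iteration shrinks hi - lo by at least one)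
def bsearchGo (premin : List Int) (tmp : Int) : Nat → Nat → Nat → Nat
  | 0, lo, _ => lo
  | fuel + 1, lo, hi =>
    if lo < hi then
      let mid := (lo + hi) / 2
      if premin.getD mid 0 < tmp then bsearchGo premin tmp fuel lo mid
      else bsearchGo premin tmp fuel (mid + 1) hi
    else lo

def bsearch (premin : List Int) (tmp : Int) (lo hi : Nat) : Nat :=
  bsearchGo premin tmp (hi - lo) lo hi

def solution_alt (prices : List Int) : List Int :=
  let n := prices.length
  let premin := preminList prices
  let answer := (List.range (n - 1)).foldl
    (fun acc i =>
      let tmp := prices.getD i 0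
      let lo := bsearch premin tmp 0 n
      acc ++ [if lo < n then (lo : Int) + 1 else (n : Int)]) []
  answer ++ [0]

-- ===== PRECONDITION & SPEC =====
def Spec_solution (prices : List Int) (out : List Int) : Prop := out = solution_alt prices
instance (prices : List Int) (out : List Int) : Decidable (Spec_solution prices out) := by unfold Spec_solution; infer_instance

-- ===== CLAIM (what is proved, stated in full; the proofs are below) =====
def Claim_equal_solution : Prop := ∀ (prices : List Int), Dom_solution prices → Spec_solution prices (solution prices)

-- ===== LEMMAS AND PROOFS =====

-- recursive model of the prefix-minimum list
def pm (m : Int) (l : List Int) : List Int :=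
  match l with
  | [] => []
  | p :: ps => (if p < m then p else m) :: pm (if p < m then p else m) ps

def pmTop (l : List Int) : List Int :=
  match l with
  | [] => []
  | p :: ps => p :: pm p ps

def pmLast (m : Int) (l : List Int) : Int :=
  l.foldl (fun a p => if p < a then p else a) m

lemma preminList_aux (l : List Int) (m : Int) (acc : List Int) :
    (l.foldl
      (fun (st : Option Int × List Int) p =>
        let m : Int := match st.1 with
          | none => p
          | some m0 => if p < m0 then p else m0
        (some m, st.2 ++ [m])) (some m, acc)) = (some (pmLast m l), acc ++ pm m l) := by
  induction l generalizing m acc with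
  | nil => simp [pmLast, pm]
  | cons p ps ih => simp [List.foldl, pmLast, pm, ih, List.foldl]

lemma preminList_eq (l : List Int) : preminList l = pmTop l := by
  cases l with
  | nil => rfl
  | cons p ps =>
    simp only [preminList, pmTop, List.foldl, preminList_aux]
    simp

lemma pm_length (m : Int) (l : List Int) : (pm m l).length = l.length := by
  induction l generalizing m with
  | nil => rfl
  | cons p ps ih => simp [pm, ih]

lemma pmTop_length (l : List Int) : (pmTop l).length = l.length := by
  cases l with
  | nil => rfl
  | cons p ps => simp [pmTop, pm_length]

lemma pm_le (m : Int) (l : List Int) : ∀ x ∈ pm m l, x ≤ m := by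
  induction l generalizing m with
  | nil => simp [pm]
  | cons p ps ih =>
    intro x hx
    simp only [pm, List.mem_cons] at hx
    rcases hx with h | h
    · subst h; split <;> omega
    · have := ih (if p < m then p else m) x h
      split at this <;> omega

lemma pm_pairwise (m : Int) (l : List Int) :
    List.Pairwise (fun a b => b ≤ a) (pm m l) := by
  induction l generalizing m with
  | nil => simp [pm]
  | cons p ps ih =>
    simp only [pm, List.pairwise_cons]
    exact ⟨fun y hy => pm_le _ _ y hy, ih _⟩

lemma pmTop_pairwise (l : List Int) :
    List.Pairwise (fun a b => b ≤ a) (pmTop l) := by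
  cases l with
  | nil => simp [pmTop]
  | cons p ps =>
    simp only [pmTop, List.pairwise_cons]
    exact ⟨fun y hy => pm_le _ _ y hy, pm_pairwise _ _⟩

lemma findIdx_pm (tmp m : Int) (l : List Int) (hm : ¬ m < tmp) :
    (pm m l).findIdx (fun x => decide (x < tmp)) = l.findIdx (fun p => decide (p < tmp)) := by
  induction l generalizing m with
  | nil => simp [pm]
  | cons p ps ih =>
    by_cases hp : p < tmp
    · have h1 : (if p < m then p else m) < tmp := by split <;> omega
      simp [pm, List.findIdx_cons, hp, h1]
    · have h1 : ¬ (if p < m then p else m) < tmp := by split <;> omega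
      simp [pm, List.findIdx_cons, hp, h1, ih _ h1]

lemma findIdx_pmTop (tmp : Int) (l : List Int) :
    (pmTop l).findIdx (fun x => decide (x < tmp)) = l.findIdx (fun p => decide (p < tmp)) := by
  cases l with
  | nil => rfl
  | cons p ps =>
    by_cases hp : p < tmp
    · simp [pmTop, List.findIdx_cons, hp]
    · simp [pmTop, List.findIdx_cons, hp, findIdx_pm tmp p ps hp]

-- the first index whose entry satisfies the predicate, getD form
lemma findIdx_getD (B : List Int) (tmp : Int) (h : B.findIdx (fun x => decide (x < tmp)) < B.length) :
    B.getD (B.findIdx (fun x => decide (x < tmp))) 0 < tmp := by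
  rw [List.getD_eq_getElem _ _ h]
  have := List.findIdx_getElem (w := h)
  simpa using this

lemma findIdx_getD_not (B : List Int) (tmp : Int) (j : Nat)
    (h : j < B.findIdx (fun x => decide (x < tmp))) (hj : j < B.length) :
    ¬ B.getD j 0 < tmp := by
  rw [List.getD_eq_getElem _ _ hj]
  have := List.not_of_lt_findIdx (p := fun x => decide (x < tmp)) (xs := B) (h := h)
  simpa using this

-- binary search over a non-increasing list finds the first index below tmp
lemma bsearchGo_eq (B : List Int) (tmp : Int) (n : Nat) (hn : B.length = n)
    (mono : ∀ i j, i ≤ j → j < n → B.getD i 0 < tmp → B.getD j 0 < tmp) :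
    ∀ fuel lo hi, hi - lo ≤ fuel → lo ≤ hi → hi ≤ n →
      (∀ j, j < lo → ¬ B.getD j 0 < tmp) →
      (∀ j, hi ≤ j → j < n → B.getD j 0 < tmp) →
      bsearchGo B tmp fuel lo hi = B.findIdx (fun x => decide (x < tmp)) := by
  have hK : B.findIdx (fun x => decide (x < tmp)) ≤ n := hn ▸ List.findIdx_le_length
  intro fuel
  induction fuel with
  | zero =>
    intro lo hi hfuel hlh hhn hlow hhigh
    have hle : lo = hi := by omega
    subst hle
    show lo = _
    set K := B.findIdx (fun x => decide (x < tmp)) with hKdef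
    by_contra hne
    rcases Nat.lt_or_ge K lo with h | h
    · exact hlow K h (findIdx_getD B tmp (by omega))
    · have hKlt : lo < K := by omega
      have hlon : lo < n := by omega
      exact findIdx_getD_not B tmp lo hKlt (by omega) (hhigh lo le_rfl hlon)
  | succ f ih =>
    intro lo hi hfuel hlh hhn hlow hhigh
    rw [bsearchGo]
    by_cases hlt : lo < hi
    · simp only [hlt, if_true]
      set mid := (lo + hi) / 2 with hmid
      have hmlo : lo ≤ mid := by omega
      have hmhi : mid < hi := by omega
      by_cases hP : B.getD mid 0 < tmp
      · simp only [hP, if_true]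
        exact ih lo mid (by omega) hmlo (by omega) hlow
          (fun j hj hjn => mono mid j hj hjn hP)
      · simp only [hP, if_false]
        refine ih (mid + 1) hi (by omega) (by omega) hhn ?_ hhigh
        intro j hj hPj
        exact hP (mono j mid (by omega) (by omega) hPj)
    · simp only [hlt, if_false]
      have hle : lo = hi := by omega
      subst hle
      set K := B.findIdx (fun x => decide (x < tmp)) with hKdef
      by_contra hne
      rcases Nat.lt_or_ge K lo with h | h
      · exact hlow K h (findIdx_getD B tmp (by omega))
      · have hKlt : lo < K := by omega
        have hlon : lo < n := by omega
        exact findIdx_getD_not B tmp lo hKlt (by omega) (hhigh lo le_rfl hlon)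

-- A's inner scan computes min(firstIdx+1, n)
lemma solInner_eq (tmp : Int) (l : List Int) (time : Int) :
    solInner tmp l time = time + ↑(min (l.findIdx (fun p => decide (tmp > p)) + 1) l.length) := by
  induction l generalizing time with
  | nil => simp [solInner]
  | cons p ps ih =>
    simp only [solInner, List.findIdx_cons, List.length_cons]
    by_cases hp : tmp > p
    · have hd : (decide (tmp > p)) = true := by simpa using hp
      rw [if_pos hp, hd]
      simp only [cond_true]
      have h1 : min (0 + 1) (ps.length + 1) = 1 := by omega
      rw [h1]
      push_cast
      ring
    · have hfi : ps.findIdx (fun p => decide (tmp > p)) ≤ ps.length := List.findIdx_le_length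
      have hd : (decide (tmp > p)) = false := by simpa using hp
      rw [if_neg hp, ih, hd]
      simp only [cond_false]
      push_cast
      omega

-- A's outer loop processes all but the last queue element, then appends 0
lemma solLoop_eq (q prices ans : List Int) :
    solLoop prices q ans = ans ++ q.dropLast.map (fun t => solInner t prices 0) ++ [0] := by
  induction q generalizing ans with
  | nil => simp [solLoop]
  | cons t qs ih =>
    cases qs with
    | nil => simp [solLoop]
    | cons r rest =>
      simp only [solLoop, ih]
      simp [List.dropLast_cons₂]

-- B's foldl-append is a map
lemma foldl_app_map {α β : Type} (l : List α) (f : α → β) (acc : List β) :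
    l.foldl (fun a i => a ++ [f i]) acc = acc ++ l.map f := by
  induction l generalizing acc with
  | nil => simp
  | cons x xs ih => simp [List.foldl, ih]

-- per-element agreement
lemma central (prices : List Int) (tmp : Int) :
    (if bsearch (preminList prices) tmp 0 prices.length < prices.length
       then (bsearch (preminList prices) tmp 0 prices.length : Int) + 1
       else (prices.length : Int))
    = ↑(min (prices.findIdx (fun p => decide (tmp > p)) + 1) prices.length) := by
  set n := prices.length with hn
  set B := preminList prices with hB
  have hBpm : B = pmTop prices := preminList_eq prices
  have hBlen : B.length = n := by rw [hBpm, pmTop_length]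
  have hmono : ∀ i j, i ≤ j → j < n → B.getD i 0 < tmp → B.getD j 0 < tmp := by
    intro i j hij hjn hi
    rcases Nat.eq_or_lt_of_le hij with rfl | hlt
    · exact hi
    have hpw := pmTop_pairwise prices
    rw [← hBpm] at hpw
    have hjB : j < B.length := by omega
    have hiB : i < B.length := by omega
    have := (List.pairwise_iff_getElem.mp hpw) i j hiB hjB hlt
    rw [List.getD_eq_getElem _ _ hiB] at hi
    rw [List.getD_eq_getElem _ _ hjB]
    omega
  have hbs : bsearch B tmp 0 n = B.findIdx (fun x => decide (x < tmp)) :=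
    bsearchGo_eq B tmp n hBlen hmono (n - 0) 0 n (by omega) (by omega) le_rfl
      (by omega) (fun j hj hjn => absurd hj (by omega))
  have hidx : B.findIdx (fun x => decide (x < tmp)) = prices.findIdx (fun p => decide (tmp > p)) := by
    rw [hBpm, findIdx_pmTop]
  set K := prices.findIdx (fun p => decide (tmp > p)) with hKdef
  have hKn : K ≤ n := hn ▸ List.findIdx_le_length
  rw [hbs, hidx]
  by_cases h : K < n
  · rw [if_pos h]
    push_cast
    omega
  · rw [if_neg h]
    push_cast
    omega

-- dropLast indexed by range
lemma dropLast_map_range {β : Type} (prices : List Int) (f : Int → β) :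
    prices.dropLast.map f = (List.range (prices.length - 1)).map (fun i => f (prices.getD i 0)) := by
  apply List.ext_getElem
  · simp
  · intro i h1 h2
    simp only [List.getElem_map, List.getElem_range, List.getElem_dropLast]
    congr 1
    rw [List.getD_eq_getElem _ _ (by simp at h1; omega)]

theorem solution_spec : Claim_equal_solution := by
  intro prices _
  show solLoop prices prices [] = solution_alt prices
  rw [solLoop_eq]
  unfold solution_alt
  dsimp only
  rw [foldl_app_map, dropLast_map_range]
  simp only [List.nil_append]
  congr 1
  apply List.map_congr_left
  intro i hi
  rw [solInner_eq, ← central prices (prices.getD i 0)]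
  ring
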